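-- pv_equiv track=rewrite | github.com/RushabhShahPrograms/30DaysOfCode | Day 21/winner swimmer.py | solve
-- ===== SOURCE A (Python) =====
-- def solve(nums):
--     if not nums:
--         return 0
--     n = len(nums)
--     ans = 0
--     nums.sort()
--     a = 0
--     for i in range(n - 1, -1, -1):
--         cand = nums[i] + n - i
--         if cand > a:
--             a = cand
--     for x in nums:
--         if x + n >= a:
--             ans += 1
--     return ans
-- ===== SOURCE B (Python) =====
-- def solve(nums):
--     if not nums:
--         return 0
--     nums.sort()
--     n = len(nums)
--     a = 0
--     for i, v in enumerate(nums):
--         a = max(a, v + n - i)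
--     # binary search for the first index whose element satisfies x + n >= a
--     # (the predicate is monotone because nums is sorted ascending)
--     lo, hi = 0, n
--     while lo < hi:
--         mid = (lo + hi) // 2
--         if nums[mid] + n >= a:
--             hi = mid
--         else:
--             lo = mid + 1
--     return n - lo
-- ===== Notes on version B (the rewrite author's own statement) =====
-- stated objective: alternative
-- what changed: The backward if-updated max scan becomes a forward enumerate/max pass, and the linear counting loop is replaced by a binary search for the first index with nums[i] + n >= a (monotone on the sorted list), returning n - lo.
import Mathlib
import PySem

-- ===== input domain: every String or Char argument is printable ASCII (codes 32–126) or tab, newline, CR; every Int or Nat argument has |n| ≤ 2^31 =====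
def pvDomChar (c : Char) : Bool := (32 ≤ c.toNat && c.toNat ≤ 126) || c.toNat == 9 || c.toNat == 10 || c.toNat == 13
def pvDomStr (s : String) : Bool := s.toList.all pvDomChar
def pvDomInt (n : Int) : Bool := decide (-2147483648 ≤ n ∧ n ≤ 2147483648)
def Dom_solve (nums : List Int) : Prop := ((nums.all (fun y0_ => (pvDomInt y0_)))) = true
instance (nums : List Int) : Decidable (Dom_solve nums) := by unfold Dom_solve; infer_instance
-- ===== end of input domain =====

-- B replaces A's backward running-max scan by a forward enumerate pass and A's linear
-- counting loop by a binary search on the sorted list (alternative algorithm, same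
-- asymptotics); both A and B sort the Python argument in place — the theorem is about
-- the return value.


-- ===== PORT A =====
def solve (nums : List Int) : Int :=
  if nums = [] then 0
  else
    let n : Int := PySem.List.len nums
    let s := PySem.List.sorted nums (fun x => x) false
    let a : Int := (PySem.List.pyRange (n - 1) (-1) (-1)).foldl
      (fun a i =>
        let cand := PySem.List.pyGetD s i 0 + n - i
        if cand > a then cand else a) 0
    s.foldl (fun ans x => if x + n ≥ a then ans + 1 else ans) 0

-- ===== PORT B =====
-- the hand-written while-loop binary search of Source B
def bsearchB (s : List Int) (n a : Int) (lo hi : Nat) : Nat :=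
  if lo < hi then
    let mid := (lo + hi) / 2
    if PySem.List.pyGetD s (mid : Int) 0 + n ≥ a then bsearchB s n a lo mid
    else bsearchB s n a (mid + 1) hi
  else lo
termination_by hi - lo
decreasing_by all_goals omega


def solve_alt (nums : List Int) : Int :=
  if nums = [] then 0
  else
    let s := PySem.List.sorted nums (fun x => x) false
    let n : Int := PySem.List.len s
    let a : Int := (PySem.List.enumerate s).foldl (fun a p => max a (p.2 + n - p.1)) 0
    let lo := bsearchB s n a 0 s.length
    n - (lo : Int)

-- ===== PRECONDITION & SPEC =====
def Spec_solve (nums : List Int) (out : Int) : Prop := out = solve_alt nums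
instance (nums : List Int) (out : Int) : Decidable (Spec_solve nums out) := by unfold Spec_solve; infer_instance

-- ===== CLAIM (what is proved, stated in full; the proofs are below) =====
def Claim_equal_solve : Prop := ∀ (nums : List Int), Dom_solve nums → Spec_solve nums (solve nums)

-- ===== LEMMAS AND PROOFS =====

theorem foldl_max_out (t : List Int) : ∀ c x : Int, t.foldl max (max c x) = max x (t.foldl max c) := by
  induction t with
  | nil => intro c x; simp [max_comm]
  | cons y t ih =>
    intro c x
    simp only [List.foldl_cons]
    rw [max_right_comm, ih]

theorem foldl_max_rev (m : List Int) : ∀ c : Int, m.reverse.foldl max c = m.foldl max c := by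
  induction m with
  | nil => intro c; rfl
  | cons x t ih =>
    intro c
    simp only [List.reverse_cons, List.foldl_append, List.foldl_cons, List.foldl_nil, ih,
      foldl_max_out]
    exact max_comm _ _

theorem maxA_eq_maxB (s : List Int) (n : Int) (hn : n = PySem.List.len s) :
    (PySem.List.pyRange (n - 1) (-1) (-1)).foldl
      (fun a i =>
        let cand := PySem.List.pyGetD s i 0 + n - i
        if cand > a then cand else a) 0
    = (PySem.List.enumerate s).foldl (fun a p => max a (p.2 + n - p.1)) 0 := by
  subst hn
  have hstep : (fun (a i : Int) =>
      let cand := PySem.List.pyGetD s i 0 + PySem.List.len s - i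
      if cand > a then cand else a)
      = fun (a i : Int) => max a (PySem.List.pyGetD s i 0 + PySem.List.len s - i) := by
    funext a i; dsimp only; omega
  rw [hstep, PySem.List.pyRange_neg_one_eq_reverse]
  have h0 : (-1 : Int) + 1 = 0 := by norm_num
  have h1 : PySem.List.len s - 1 + 1 = PySem.List.len s := by ring
  rw [h0, h1, PySem.List.enumerate_eq_map_pyRange s 0, List.foldl_map]
  have : ∀ (l : List Int) (c : Int),
      l.reverse.foldl (fun a i => max a (PySem.List.pyGetD s i 0 + PySem.List.len s - i)) c
      = l.foldl (fun a i => max a (PySem.List.pyGetD s i 0 + PySem.List.len s - i)) c := by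
    intro l c
    have h := foldl_max_rev (l.map fun i => PySem.List.pyGetD s i 0 + PySem.List.len s - i) c
    simpa [List.foldl_map, List.foldr_map, List.map_reverse] using h
  rw [this]

theorem bsearchB_spec (s : List Int) (n a : Int)
    (hs : s.Pairwise (· ≤ ·)) : ∀ (k lo hi : Nat), hi - lo ≤ k →
    hi ≤ s.length → lo ≤ hi →
    (∀ j : Nat, (h : j < s.length) → j < lo → ¬ (s[j] + n ≥ a)) →
    (∀ j : Nat, (h : j < s.length) → hi ≤ j → s[j] + n ≥ a) →
    bsearchB s n a lo hi ≤ s.length ∧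
    (∀ j : Nat, (h : j < s.length) → j < bsearchB s n a lo hi → ¬ (s[j] + n ≥ a)) ∧
    (∀ j : Nat, (h : j < s.length) → bsearchB s n a lo hi ≤ j → s[j] + n ≥ a) := by
  intro k
  induction k with
  | zero =>
    intro lo hi hk hhi hlh hlo hge
    have he : lo = hi := by omega
    rw [bsearchB]
    simp only [he, lt_irrefl, if_false]
    exact ⟨by omega, fun j h hj => hlo j h (by omega), fun j h hj => hge j h (by omega)⟩
  | succ k ih =>
    intro lo hi hk hhi hlh hlo hge
    rw [bsearchB]
    by_cases hlt : lo < hi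
    · simp only [hlt, if_true]
      set mid := (lo + hi) / 2 with hmid
      have hmlt : mid < s.length := by omega
      have hget : PySem.List.pyGetD s (mid : Int) 0 = s[mid] := by
        rw [PySem.List.pyGetD_natCast, List.getD_eq_getElem s 0 hmlt]
      rw [hget]
      have hmono : ∀ i j : Nat, (hi_ : i < s.length) → (hj_ : j < s.length) → i ≤ j → s[i] ≤ s[j] := by
        intro i j hi_ hj_ hij
        rcases Nat.lt_or_ge i j with h | h
        · exact List.pairwise_iff_getElem.mp hs i j hi_ hj_ h
        · have : i = j := by omega
          subst this; rfl
      by_cases hp : s[mid] + n ≥ a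
      · simp only [hp, if_true]
        exact ih lo mid (by omega) (by omega) (by omega) hlo
          (fun j h hj => by have := hmono mid j hmlt h hj; omega)
      · simp only [hp, if_false]
        exact ih (mid + 1) hi (by omega) hhi (by omega)
          (fun j h hj => by
            have := hmono j mid h hmlt (by omega)
            omega) hge
    · simp only [hlt, if_false]
      have he : lo = hi := by omega
      exact ⟨by omega, fun j h hj => hlo j h (by omega), fun j h hj => hge j h (by omega)⟩

theorem countP_split (s : List Int) (p : Int → Bool) (r : Nat) (hr : r ≤ s.length)
    (h1 : ∀ j : Nat, (h : j < s.length) → j < r → p s[j] = false)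
    (h2 : ∀ j : Nat, (h : j < s.length) → r ≤ j → p s[j] = true) :
    s.countP p = s.length - r := by
  conv_lhs => rw [← List.take_append_drop r s]
  rw [List.countP_append]
  have ht : (s.take r).countP p = 0 := by
    rw [List.countP_eq_zero]
    intro x hx
    obtain ⟨i, hi, hix⟩ := List.getElem_of_mem hx
    have hi' : i < s.length := by
      have := List.length_take_le r s; omega
    have hir : i < r := by
      simp [List.length_take] at hi; omega
    rw [← hix, List.getElem_take]
    simp [h1 i hi' hir]
  have hd : (s.drop r).countP p = (s.drop r).length := by
    rw [List.countP_eq_length]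
    intro x hx
    obtain ⟨i, hi, hix⟩ := List.getElem_of_mem hx
    have hi' : r + i < s.length := by simp [List.length_drop] at hi; omega
    rw [← hix, List.getElem_drop]
    exact h2 (r + i) hi' (by omega)
  rw [ht, hd, List.length_drop]
  omega


-- ===== VERDICT (by name: the statement is the Claim_ definition above) =====
theorem solve_spec : Claim_equal_solve := by
  intro nums _
  unfold Spec_solve
  by_cases h : nums = []
  · simp [solve, solve_alt, h]
  · simp only [solve, solve_alt, if_neg h]
    set s := PySem.List.sorted nums (fun x => x) false with hs_def
    have hlen : s.length = nums.length := PySem.List.length_sorted nums (fun x => x) false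
    have hn : PySem.List.len nums = PySem.List.len s := by simp [hlen]
    rw [hn, maxA_eq_maxB s (PySem.List.len s) rfl]
    set n := PySem.List.len s with hn_def
    set a := (PySem.List.enumerate s).foldl (fun a p => max a (p.2 + n - p.1)) 0 with ha_def
    have hpair : s.Pairwise (· ≤ ·) := PySem.List.sorted_pairwise nums (fun x => x)
    obtain ⟨hr1, hr2, hr3⟩ := bsearchB_spec s n a hpair s.length 0 s.length (by omega) (le_refl _)
      (by omega) (fun j h hj => absurd hj (by omega)) (fun j h hj => absurd h (by omega))
    set r := bsearchB s n a 0 s.length with hr_def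
    rw [PySem.List.foldl_ite_add_one (fun x => x + n ≥ a) s 0]
    rw [countP_split s _ r hr1
      (fun j h hj => decide_eq_false (hr2 j h hj))
      (fun j h hj => decide_eq_true (hr3 j h hj))]
    have hnlen : n = (s.length : Int) := by simp [hn_def]
    rw [hnlen]
    push_cast [Nat.cast_sub hr1]
    ring
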